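-- pv_equiv track=rewrite | github.com/JECSand/excel_to_json_csv_converter | excel-to-json-csv-converter.py | headers_datetime_process
-- ===== SOURCE A (Python) =====
-- def headers_datetime_process(headers):
--     datetime_fields = {}
--     date_fields = {}
--     time_fields = {}
--     for header in headers:
--         if 'date' in str(header).lower() and 'time' in str(header).lower():
--             dict_ent = {header: headers.index(str(header))}
--             datetime_fields.update(dict_ent)
--         elif 'date' in str(header).lower() and 'time' not in str(header).lower():
--             dict_ent = {header: headers.index(str(header))}
--             date_fields.update(dict_ent)
--         elif 'time' in str(header).lower() and 'date' not in str(header).lower():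
--             dict_ent = {header: headers.index(str(header))}
--             time_fields.update(dict_ent)
--     return [datetime_fields, date_fields, time_fields]
-- ===== SOURCE B (Python) =====
-- def headers_datetime_process(headers):
--     dated = {h for h in headers if 'date' in str(h).lower()}
--     timed = {h for h in headers if 'time' in str(h).lower()}
--     seen = dict.fromkeys(headers)
--
--     def pick(sel):
--         return {h: headers.index(str(h)) for h in seen if h in sel}
--
--     return [pick(dated & timed), pick(dated - timed), pick(timed - dated)]
-- ===== Notes on version B (the rewrite author's own statement) =====
-- stated objective: alternative
-- what changed: A classifies each header through a single if/elif cascade filling three dicts in one loop; B first builds two substring-selected sets ('date' / 'time' headers) and an ordered deduplicated key list, then forms the three dicts by set algebra (intersection, and the two differences).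
import Mathlib
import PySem

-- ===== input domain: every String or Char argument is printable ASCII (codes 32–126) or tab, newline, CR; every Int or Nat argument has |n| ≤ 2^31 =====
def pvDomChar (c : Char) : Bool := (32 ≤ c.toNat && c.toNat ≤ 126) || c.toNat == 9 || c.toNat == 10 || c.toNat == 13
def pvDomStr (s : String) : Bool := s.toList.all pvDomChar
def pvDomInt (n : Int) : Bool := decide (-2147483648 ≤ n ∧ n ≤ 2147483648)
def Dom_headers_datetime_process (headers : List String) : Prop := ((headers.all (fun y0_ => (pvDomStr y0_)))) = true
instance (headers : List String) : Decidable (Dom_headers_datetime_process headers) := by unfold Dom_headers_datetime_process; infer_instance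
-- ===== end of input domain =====

-- B replaces A's per-header if/elif cascade into three dicts by one build-membership-then-combine pass:
-- two substring-selected sets plus an ordered key list, combined by set algebra (objective: alternative, same cost).

-- headers.index(str(header)) — header always occurs in headers (it came from it; str is the identity on str),
-- so Python's .index never raises here and the .getD 0 default is never used.
def pvIdx (headers : List String) (h : String) : Int :=
  ((PySem.List.index? headers h).getD 0 : Nat)

-- ===== PORT A =====
-- one step of A's for-loop over the triple (datetime_fields, date_fields, time_fields); str(header) = header on strings
def pvStepA (headers : List String)
    (st : PySem.Dict String Int × PySem.Dict String Int × PySem.Dict String Int) (header : String) :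
    PySem.Dict String Int × PySem.Dict String Int × PySem.Dict String Int :=
  if PySem.Str.isIn "date" (PySem.Str.lower header) && PySem.Str.isIn "time" (PySem.Str.lower header) then
    (st.1.insert header (pvIdx headers header), st.2.1, st.2.2)
  else if PySem.Str.isIn "date" (PySem.Str.lower header) && !PySem.Str.isIn "time" (PySem.Str.lower header) then
    (st.1, st.2.1.insert header (pvIdx headers header), st.2.2)
  else if PySem.Str.isIn "time" (PySem.Str.lower header) && !PySem.Str.isIn "date" (PySem.Str.lower header) then
    (st.1, st.2.1, st.2.2.insert header (pvIdx headers header))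
  else st

def headers_datetime_process (headers : List String) : List (List (String × Int)) :=
  let st := headers.foldl (pvStepA headers) (PySem.Dict.empty, PySem.Dict.empty, PySem.Dict.empty)
  [st.1.items, st.2.1.items, st.2.2.items]

-- ===== PORT B =====
-- pick(sel): the dict comprehension {h: headers.index(h) for h in seen if h in sel}
def pvPick (headers : List String) (sel : PySem.Set String) : List (String × Int) :=
  (((PySem.List.dedup headers).filter (fun h => PySem.Set.contains sel h)).foldl
      (fun (d : PySem.Dict String Int) h => d.insert h (pvIdx headers h)) PySem.Dict.empty).items

def headers_datetime_process_alt (headers : List String) : List (List (String × Int)) :=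
  let dated : PySem.Set String :=
    PySem.Set.ofList (headers.filter (fun h => PySem.Str.isIn "date" (PySem.Str.lower h)))
  let timed : PySem.Set String :=
    PySem.Set.ofList (headers.filter (fun h => PySem.Str.isIn "time" (PySem.Str.lower h)))
  [pvPick headers (PySem.Set.inter dated timed),
   pvPick headers (PySem.Set.diff dated timed),
   pvPick headers (PySem.Set.diff timed dated)]

-- ===== PRECONDITION & SPEC =====
def Spec_headers_datetime_process (headers : List String) (out : List (List (String × Int))) : Prop := out = headers_datetime_process_alt headers
instance (headers : List String) (out : List (List (String × Int))) : Decidable (Spec_headers_datetime_process headers out) := by unfold Spec_headers_datetime_process; infer_instance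

-- ===== CLAIM (what is proved, stated in full; the proofs are below) =====
def Claim_equal_headers_datetime_process : Prop := ∀ (headers : List String), Dom_headers_datetime_process headers → Spec_headers_datetime_process headers (headers_datetime_process headers)

-- ===== LEMMAS AND PROOFS =====

-- the one-predicate fold A effectively performs on each of the three dicts
def pvFoldP (headers : List String) (p : String → Bool) : PySem.Dict String Int :=
  headers.foldl (fun d h => if p h then d.insert h (pvIdx headers h) else d) PySem.Dict.empty

-- A's triple fold splits into three independent one-predicate folds
lemma pvSplit3 (headers : List String) : ∀ (hs : List String)
    (a b c : PySem.Dict String Int),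
    hs.foldl (pvStepA headers) (a, b, c) =
      (hs.foldl (fun d h => if PySem.Str.isIn "date" (PySem.Str.lower h) && PySem.Str.isIn "time" (PySem.Str.lower h) then d.insert h (pvIdx headers h) else d) a,
       hs.foldl (fun d h => if PySem.Str.isIn "date" (PySem.Str.lower h) && !PySem.Str.isIn "time" (PySem.Str.lower h) then d.insert h (pvIdx headers h) else d) b,
       hs.foldl (fun d h => if PySem.Str.isIn "time" (PySem.Str.lower h) && !PySem.Str.isIn "date" (PySem.Str.lower h) then d.insert h (pvIdx headers h) else d) c) := by
  intro hs
  induction hs with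
  | nil => intro a b c; rfl
  | cons h hs ih =>
    intro a b c
    simp only [List.foldl_cons]
    cases hd : PySem.Str.isIn "date" (PySem.Str.lower h) <;>
      cases ht : PySem.Str.isIn "time" (PySem.Str.lower h) <;>
      simp only [pvStepA, hd, ht, Bool.and_self, Bool.and_true, Bool.and_false, Bool.not_true, Bool.not_false, Bool.false_eq_true, reduceIte, ih]

-- the items of a one-predicate insert fold: the deduplicated qualifying headers, in first-occurrence order
lemma pvFoldP_items (f : String → Int) (p : String → Bool) (hs : List String) :
    (hs.foldl (fun (d : PySem.Dict String Int) h => if p h then d.insert h (f h) else d)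
        PySem.Dict.empty).items
      = ((PySem.Set.ofList hs).filter p).map (fun h => (h, f h)) := by
  induction hs using List.reverseRecOn with
  | nil => rfl
  | append_singleton hs h ih =>
    rw [List.foldl_append, List.foldl_cons, List.foldl_nil, PySem.Set.ofList_append_singleton]
    set D := hs.foldl (fun (d : PySem.Dict String Int) h => if p h then d.insert h (f h) else d)
      PySem.Dict.empty with hD
    have hkeys : D.keys = (PySem.Set.ofList hs).filter p := by
      show D.items.map (·.1) = _
      rw [ih, List.map_map]
      simp [Function.comp_def]
    by_cases hmem : h ∈ PySem.Set.ofList hs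
    · rw [PySem.Set.add_of_mem hmem]
      cases hp : p h with
      | false => simp only [if_false, Bool.false_eq_true, ih]
      | true =>
        have hcont : D.contains h = true := by
          rw [PySem.Dict.contains_iff_mem_keys, hkeys, List.mem_filter]
          exact ⟨hmem, hp⟩
        simp only [if_true]
        rw [PySem.Dict.items_insert_of_contains D (f h) hcont, ih, List.map_map]
        refine List.map_congr_left (fun x hx => ?_)
        by_cases hxh : x = h
        · subst hxh; simp
        · simp [Function.comp, hxh]
    · rw [PySem.Set.add_of_not_mem hmem, List.filter_append]
      cases hp : p h with
      | false => simp only [if_false, Bool.false_eq_true, ih, List.filter_singleton, hp]; simp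
      | true =>
        have hcont : D.contains h = false := by
          rw [← Bool.not_eq_true, PySem.Dict.contains_iff_mem_keys, hkeys, List.mem_filter]
          exact fun hc => hmem hc.1
        simp only [if_true]
        rw [PySem.Dict.items_insert_of_not_contains D (f h) hcont, ih, List.filter_singleton, hp]
        simp

-- B's pick: the same shape, with the filter done on the deduplicated header list
lemma pvPick_eq (headers : List String) (sel : PySem.Set String) :
    pvPick headers sel
      = ((PySem.Set.ofList headers).filter (fun h => PySem.Set.contains sel h)).map
          (fun h => (h, pvIdx headers h)) := by
  unfold pvPick
  rw [PySem.List.dedup_eq_ofList]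
  rw [PySem.Dict.items_foldl_insert_fresh _ (fun h => h) (fun h => pvIdx headers h) PySem.Dict.empty
    (fun a _ => PySem.Dict.contains_empty a)
    (by simpa using (PySem.Set.nodup_ofList headers).filter _)]
  simp [PySem.Dict.empty]

-- membership in B's combined sets, read back as A's boolean tests (for h drawn from headers)
lemma pvSel_inter (headers : List String) (pd pt : String → Bool) (h : String) (hmem : h ∈ headers) :
    PySem.Set.contains (PySem.Set.inter (PySem.Set.ofList (headers.filter pd)) (PySem.Set.ofList (headers.filter pt))) h
      = (pd h && pt h) := by
  rw [Bool.eq_iff_iff, PySem.Set.contains_iff]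
  simp [PySem.Set.mem_inter, PySem.Set.mem_ofList, List.mem_filter, hmem]

lemma pvSel_diff (headers : List String) (pd pt : String → Bool) (h : String) (hmem : h ∈ headers) :
    PySem.Set.contains (PySem.Set.diff (PySem.Set.ofList (headers.filter pd)) (PySem.Set.ofList (headers.filter pt))) h
      = (pd h && !pt h) := by
  rw [Bool.eq_iff_iff, PySem.Set.contains_iff]
  simp [PySem.Set.mem_diff, PySem.Set.mem_ofList, List.mem_filter, hmem]

-- ===== VERDICT (by name: the statement is the Claim_ definition above) =====
theorem headers_datetime_process_spec : Claim_equal_headers_datetime_process := by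
  intro headers _
  unfold Spec_headers_datetime_process headers_datetime_process headers_datetime_process_alt
  rw [pvSplit3]
  simp only [pvFoldP_items (pvIdx headers), pvPick_eq]
  have hfc : ∀ (q : String → Bool) (sel : PySem.Set String),
      (∀ h ∈ headers, PySem.Set.contains sel h = q h) →
      (PySem.Set.ofList headers).filter (fun h => PySem.Set.contains sel h)
        = (PySem.Set.ofList headers).filter q := by
    intro q sel hq
    exact List.filter_congr (fun x hx => hq x ((PySem.Set.mem_ofList headers x).mp hx))
  rw [hfc _ _ (fun h hm => pvSel_inter headers _ _ h hm),
      hfc _ _ (fun h hm => pvSel_diff headers _ _ h hm),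
      hfc _ _ (fun h hm => pvSel_diff headers _ _ h hm)]
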